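-- pv_equiv track=rewrite | github.com/ankit11708059/Pattern-Pandits | ingest_analytics_comprehensive_1536d.py | parse_journey_knowledge
-- ===== SOURCE A (Python) =====
-- from typing import List, Dict
--
-- def parse_journey_knowledge(lines: List[str], start_idx: int, counter: int) -> Dict:
--     """Parse user journey and flow pattern knowledge"""
--     try:
--         journey_line = lines[start_idx].strip()
--
--         journey_data = {
--             'id': f"journey_{counter:03d}_pattern",
--             'type': 'user_journey_pattern',
--             'name': f"User Journey: {journey_line[:50]}",
--             'pattern_type': 'user_flow',
--             'content_type': 'journey_insights',
--             'full_content': journey_line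
--         }
--
--         # Parse journey content
--         content_parts = [journey_line]
--         for j in range(start_idx + 1, min(start_idx + 30, len(lines))):
--             if j >= len(lines):
--                 break
--
--             content_line = lines[j].strip()
--
--             if content_line.startswith('##') or content_line.startswith('###'):
--                 break
--
--             if content_line:
--                 content_parts.append(content_line)
--
--         journey_data['full_content'] = ' '.join(content_parts)
--         journey_data['searchable_content'] = journey_data['full_content']
--         journey_data['description'] = f"User journey pattern and flow analysis"
--
--         return journey_data
--
--     except Exception as e:
--         return None
-- ===== SOURCE B (Python) =====
-- from typing import List, Dict
--
--
-- def parse_journey_knowledge(lines: List[str], start_idx: int, counter: int) -> Dict: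
--     """Parse user journey and flow pattern knowledge (recursive string-builder variant)."""
--     try:
--         journey_line = lines[start_idx].strip()
--
--         def grow(j: int) -> str:
--             # recursively extend the content string from line j; no list, no join
--             if j >= start_idx + 30 or j >= len(lines):
--                 return ''
--             s = lines[j].strip()
--             if s.startswith('##'):
--                 return ''
--             return ((' ' + s) if s else '') + grow(j + 1)
--
--         full_content = journey_line + grow(start_idx + 1)
--         return {
--             'id': f"journey_{counter:03d}_pattern",
--             'type': 'user_journey_pattern',
--             'name': f"User Journey: {journey_line[:50]}",
--             'pattern_type': 'user_flow',
--             'content_type': 'journey_insights',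
--             'full_content': full_content,
--             'searchable_content': full_content,
--             'description': "User journey pattern and flow analysis",
--         }
--     except Exception:
--         return None
-- ===== Notes on version B (the rewrite author's own statement) =====
-- stated objective: alternative
-- what changed: A's iterative loop that accumulates a parts list, breaks on a header and then joins with ' ' and mutates the dict in place is replaced by a recursive descent that builds the content string directly by concatenation (no intermediate list, no join, no mutation) and returns a single dict literal.
import Mathlib
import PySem

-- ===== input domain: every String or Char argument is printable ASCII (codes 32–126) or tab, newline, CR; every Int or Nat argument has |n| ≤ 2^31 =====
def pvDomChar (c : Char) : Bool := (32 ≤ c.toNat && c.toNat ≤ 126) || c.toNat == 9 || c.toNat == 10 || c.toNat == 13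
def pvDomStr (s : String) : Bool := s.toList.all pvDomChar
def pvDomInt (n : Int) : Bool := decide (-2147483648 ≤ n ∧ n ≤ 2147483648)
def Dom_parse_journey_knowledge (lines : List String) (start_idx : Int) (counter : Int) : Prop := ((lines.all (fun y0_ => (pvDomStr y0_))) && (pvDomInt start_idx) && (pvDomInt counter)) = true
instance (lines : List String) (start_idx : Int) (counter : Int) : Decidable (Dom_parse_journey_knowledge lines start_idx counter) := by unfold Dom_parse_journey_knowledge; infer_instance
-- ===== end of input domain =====

-- B replaces A's accumulate-list/break/join loop and in-place dict mutation by a recursive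
-- descent that builds the content string directly by concatenation and one dict literal.

-- f"{n:03d}": zero-pad to total width 3 including the sign (shared stdlib formatting, used by both ports)
def pvFmt03d (n : Int) : String :=
  let ds := (PySem.Int.toStr (if n < 0 then -n else n)).toList
  let total := (if n < 0 then 1 else 0) + ds.length
  let body := List.replicate (3 - total) '0' ++ ds
  String.ofList (if n < 0 then '-' :: body else body)

-- ===== PORT A =====
-- A's content loop: 'for j in range(...)' with the dead 'j >= len(lines)' guard, the
-- header break, the truthiness test and content_parts.append.  lines[j] is always in
-- range here (start_idx+1 ≤ j < len and lines[start_idx] succeeded so j ≥ 1-len), so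
-- the '.getD ""' default of the exact pyGet? is never taken.
def pvLoopA (lines : List String) : List Int → List String → List String
  | [], acc => acc
  | j :: js, acc =>
    if j ≥ (lines.length : Int) then acc
    else
      let cl := PySem.Str.strip ((PySem.List.pyGet? lines j).getD "")
      if PySem.Str.startswith cl "##" || PySem.Str.startswith cl "###" then acc
      else if cl != "" then pvLoopA lines js (acc ++ [cl])
      else pvLoopA lines js acc

def parse_journey_knowledge (lines : List String) (start_idx : Int) (counter : Int) : Option (List (String × String)) :=
  match PySem.List.pyGet? lines start_idx with
  | none => none            -- lines[start_idx] raises IndexError; the except clause returns None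
  | some l0 =>
    let journey_line := PySem.Str.strip l0
    let d0 : PySem.Dict String String :=
      ((((((PySem.Dict.empty.insert "id" (PySem.Str.join "" ["journey_", pvFmt03d counter, "_pattern"])).insert
        "type" "user_journey_pattern").insert
        "name" (PySem.Str.join "" ["User Journey: ", PySem.Str.slice journey_line none (some 50)])).insert
        "pattern_type" "user_flow").insert
        "content_type" "journey_insights").insert
        "full_content" journey_line)
    let parts := pvLoopA lines
      (PySem.List.pyRange (start_idx + 1) (min (start_idx + 30) (lines.length : Int)) 1)
      [journey_line]
    let full := PySem.Str.join " " parts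
    some ((((d0.insert "full_content" full).insert "searchable_content" full).insert
      "description" "User journey pattern and flow analysis").items)

-- ===== PORT B =====
-- Source B's grow(j): recursively extend the content string; Python's 's1 + s2' is ported as
-- PySem.Str.join "" [s1, s2] (exactly ''.join([s1, s2])); same in-range remark for '.getD ""'.
def pvGrow (lines : List String) (start_idx : Int) (j : Int) : String :=
  if _h : j ≥ start_idx + 30 ∨ j ≥ (lines.length : Int) then ""
  else
    if PySem.Str.startswith (PySem.Str.strip ((PySem.List.pyGet? lines j).getD "")) "##" then ""
    else PySem.Str.join ""
      [(if PySem.Str.strip ((PySem.List.pyGet? lines j).getD "") != "" then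
          PySem.Str.join "" [" ", PySem.Str.strip ((PySem.List.pyGet? lines j).getD "")]
        else ""),
       pvGrow lines start_idx (j + 1)]
termination_by (start_idx + 30 - j).toNat
decreasing_by omega

def parse_journey_knowledge_alt (lines : List String) (start_idx : Int) (counter : Int) : Option (List (String × String)) :=
  match PySem.List.pyGet? lines start_idx with
  | none => none            -- lines[start_idx] raises IndexError; the except clause returns None
  | some l0 =>
    let journey_line := PySem.Str.strip l0
    let full := PySem.Str.join "" [journey_line, pvGrow lines start_idx (start_idx + 1)]
    some [("id", PySem.Str.join "" ["journey_", pvFmt03d counter, "_pattern"]),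
          ("type", "user_journey_pattern"),
          ("name", PySem.Str.join "" ["User Journey: ", PySem.Str.slice journey_line none (some 50)]),
          ("pattern_type", "user_flow"),
          ("content_type", "journey_insights"),
          ("full_content", full),
          ("searchable_content", full),
          ("description", "User journey pattern and flow analysis")]

-- ===== PRECONDITION & SPEC =====
def Spec_parse_journey_knowledge (lines : List String) (start_idx : Int) (counter : Int) (out : Option (List (String × String))) : Prop := out = parse_journey_knowledge_alt lines start_idx counter
instance (lines : List String) (start_idx : Int) (counter : Int) (out : Option (List (String × String))) : Decidable (Spec_parse_journey_knowledge lines start_idx counter out) := by unfold Spec_parse_journey_knowledge; infer_instance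

-- ===== CLAIM (what is proved, stated in full; the proofs are below) =====
def Claim_equal_parse_journey_knowledge : Prop := ∀ (lines : List String) (start_idx : Int) (counter : Int), Dom_parse_journey_knowledge lines start_idx counter → Spec_parse_journey_knowledge lines start_idx counter (parse_journey_knowledge lines start_idx counter)

-- ===== LEMMAS AND PROOFS =====

-- the common middle form: the kept body lines of the scanned window
def pvW (lines : List String) (js : List Int) : List String :=
  ((js.map (fun j => PySem.Str.strip ((PySem.List.pyGet? lines j).getD ""))).takeWhile
    (fun s => !(PySem.Str.startswith s "##"))).filter (fun s => s != "")

-- '###' starts with '##', so A's disjunction is a single test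
lemma pv_startswith_absorb (s : String) :
    (PySem.Str.startswith s "##" || PySem.Str.startswith s "###") = PySem.Str.startswith s "##" := by
  cases h : PySem.Str.startswith s "##" with
  | true => simp
  | false =>
    simp only [Bool.false_or]
    cases h3 : PySem.Str.startswith s "###" with
    | false => rfl
    | true =>
      exfalso
      rw [PySem.Str.startswith_eq] at h h3
      rw [PySem.Chars.startswith_iff] at h3
      have : ("##".toList) <+: s.toList :=
        List.IsPrefix.trans (by decide) h3
      rw [(PySem.Chars.startswith_iff _ _).mpr this] at h
      exact absurd h (by decide)

-- A's loop appends exactly the kept window lines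
lemma pvLoopA_eq (lines : List String) (js : List Int) (acc : List String)
    (h : ∀ j ∈ js, j < (lines.length : Int)) :
    pvLoopA lines js acc = acc ++ pvW lines js := by
  induction js generalizing acc with
  | nil => simp [pvLoopA, pvW]
  | cons j js ih =>
    have hj : ¬ j ≥ (lines.length : Int) := by
      have := h j (List.mem_cons_self ..); omega
    have hrest : ∀ x ∈ js, x < (lines.length : Int) := fun x hx => h x (List.mem_cons_of_mem _ hx)
    simp only [pvLoopA, if_neg hj, pv_startswith_absorb, pvW, List.map_cons, List.takeWhile_cons]
    set cl := PySem.Str.strip ((PySem.List.pyGet? lines j).getD "") with hcl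
    cases hs : PySem.Str.startswith cl "##" with
    | true => simp
    | false =>
      simp only [if_true, Bool.not_false, List.filter_cons]
      cases he : (cl != "") with
      | true => simp [ih _ hrest, pvW]
      | false => simp [ih _ hrest, pvW]

-- B's recursion builds exactly the space-prefixed kept window lines, concatenated
lemma pvGrow_toList (lines : List String) (si : Int) :
    ∀ (n : Nat) (j : Int), (si + 30 - j).toNat ≤ n →
    (pvGrow lines si j).toList =
      ((pvW lines (PySem.List.pyRange j (min (si + 30) (lines.length : Int)) 1)).map
        (fun s => ' ' :: s.toList)).flatten := by
  intro n
  induction n with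
  | zero =>
    intro j hj
    have hcond : j ≥ si + 30 ∨ j ≥ (lines.length : Int) := Or.inl (by omega)
    rw [pvGrow, dif_pos hcond,
      PySem.List.pyRange_one_eq_nil (le_trans (min_le_left _ _) (by omega))]
    simp [pvW]
  | succ n ih =>
    intro j hj
    rw [pvGrow]
    by_cases hc : j ≥ si + 30 ∨ j ≥ (lines.length : Int)
    · have hstop : min (si + 30) ((lines.length : Int)) ≤ j := by
        rcases hc with h | h
        · exact le_trans (min_le_left _ _) h
        · exact le_trans (min_le_right _ _) h
      rw [dif_pos hc, PySem.List.pyRange_one_eq_nil hstop]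
      simp [pvW]
    · have hlt : j < min (si + 30) ((lines.length : Int)) := lt_min (by omega) (by omega)
      rw [dif_neg hc, PySem.List.pyRange_one_cons hlt]
      simp only [pvW, List.map_cons, List.takeWhile_cons]
      cases hh : PySem.Str.startswith (PySem.Str.strip ((PySem.List.pyGet? lines j).getD "")) "##" with
      | true => simp
      | false =>
        have hrec := ih (j + 1) (by omega)
        simp only [pvW] at hrec
        simp only [Bool.not_false, if_true, List.filter_cons]
        have hsp : (" " : String).toList = [' '] := by decide
        have hnl : ("" : String).toList = [] := by decide
        cases he : (PySem.Str.strip ((PySem.List.pyGet? lines j).getD "") != "") with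
        | true =>
          simp [hrec, PySem.Chars.join_cons_cons, PySem.Chars.join_singleton, hsp]
        | false =>
          simp [hrec, PySem.Chars.join_cons_cons, PySem.Chars.join_singleton, hnl]

-- ' '.join(x :: L) is x followed by each further part prefixed with a space
lemma pv_join_space (x : List Char) (L : List (List Char)) :
    PySem.Chars.join [' '] (x :: L) = x ++ (L.map (fun cs => ' ' :: cs)).flatten := by
  induction L generalizing x with
  | nil => simp [PySem.Chars.join_singleton]
  | cons y ys ih =>
    rw [PySem.Chars.join_cons_cons, ih y]
    simp

-- the two full_content strings coincide
lemma pv_full_eq (lines : List String) (si : Int) (jl : String) :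
    PySem.Str.join " " ([jl] ++ pvW lines
        (PySem.List.pyRange (si + 1) (min (si + 30) (lines.length : Int)) 1)) =
      PySem.Str.join "" [jl, pvGrow lines si (si + 1)] := by
  apply String.toList_inj.mp
  rw [PySem.Str.toList_join, PySem.Str.toList_join]
  have hsp : (" " : String).toList = [' '] := by decide
  have hnl : ("" : String).toList = [] := by decide
  rw [hsp, hnl]
  simp only [List.singleton_append, List.map_cons, List.map_nil]
  rw [pv_join_space, PySem.Chars.join_cons_cons, PySem.Chars.join_singleton]
  rw [pvGrow_toList lines si (si + 30 - (si + 1)).toNat (si + 1) (le_refl _)]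
  simp [List.map_map, Function.comp_def]

theorem pv_main (lines : List String) (start_idx counter : Int) :
    parse_journey_knowledge lines start_idx counter = parse_journey_knowledge_alt lines start_idx counter := by
  unfold parse_journey_knowledge parse_journey_knowledge_alt
  cases hg : PySem.List.pyGet? lines start_idx with
  | none => rfl
  | some l0 =>
    simp only []
    have hmem : ∀ j ∈ PySem.List.pyRange (start_idx + 1) (min (start_idx + 30) (lines.length : Int)) 1,
        j < (lines.length : Int) := by
      intro j hj
      have := (PySem.List.mem_pyRange_one).mp hj
      omega
    rw [pvLoopA_eq lines _ _ hmem, pv_full_eq lines start_idx (PySem.Str.strip l0)]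
    rfl

-- ===== VERDICT (by name: the statement is the Claim_ definition above) =====
theorem parse_journey_knowledge_spec : Claim_equal_parse_journey_knowledge := by
  intro lines start_idx counter _
  unfold Spec_parse_journey_knowledge
  exact pv_main lines start_idx counter
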